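-- pv_equiv track=rewrite | github.com/CristianCamiloGarciaPalacios/python | Nonograma.py | Comienzo
-- ===== SOURCE A (Python) =====
-- def Comienzo(Matriz,Determinador,Longitud, Tipo):
--     for i in range(0,Longitud):
--         Numero_datos = Determinador[i].__len__()
--         Tamaño = Numero_datos-1
--         for j in range(0, Numero_datos):
--             Tamaño += int(Determinador[i][j])
--         Espacio = Longitud-Tamaño
--         Contador = Espacio
--         for j in range (0,Numero_datos):
--             Mini_contador = 0
--             for k in range (0,Determinador[i][j]+1):
--                 if Mini_contador<(Determinador[i][j]-Espacio):
--                     if Tipo == "Filas":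
--                         Matriz[i][Contador+k] = True
--                     elif Tipo == "Columnas":
--                         Matriz[Contador+k][i] = True
--                     Mini_contador += 1
--                 elif Tamaño == Longitud and j != Numero_datos-1:
--                     if Tipo == "Filas":
--                         Matriz[i][Contador+k] = False
--                     elif Tipo == "Columnas":
--                         Matriz[Contador+k][i] = False
--                     Mini_contador += 1
--             Contador += Determinador[i][j]+1
--     return Matriz
-- ===== SOURCE B (Python) =====
-- # B: functional rebuild — classify every cell independently from clue placement arithmetic
-- # (leftmost/rightmost placement overlap), instead of A's imperative block-walk writes.
-- # Returns a NEW matrix; unlike A it does not mutate Matriz (equivalence is about the return value).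
-- def _cell(clues, Longitud, pos, old):
--     esp = Longitud - (len(clues) - 1 + sum(clues))
--     s = 0
--     for j, L in enumerate(clues):
--         if s + esp <= pos < s + L:
--             return True
--         if esp == 0 and j != len(clues) - 1 and pos == s + L:
--             return False
--         s += L + 1
--     return old
--
-- def Comienzo(Matriz, Determinador, Longitud, Tipo):
--     if Tipo == "Filas":
--         return [[_cell(Determinador[i], Longitud, c, v) for c, v in enumerate(row)]
--                 if i < Longitud else row
--                 for i, row in enumerate(Matriz)]
--     if Tipo == "Columnas":
--         return [[_cell(Determinador[c], Longitud, i, v) if c < Longitud else v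
--                  for c, v in enumerate(row)]
--                 for i, row in enumerate(Matriz)]
--     return Matriz
-- ===== Notes on version B (the rewrite author's own statement) =====
-- stated objective: alternative
-- what changed: B rebuilds the matrix functionally, classifying every cell independently (a cell is True iff it lies in the leftmost/rightmost placement overlap of some block, False on a forced separator of an exactly-filled line, otherwise unchanged), instead of A's imperative block-walk that mutates cells in place.
-- outside the precondition, e.g. on Comienzo([[False]], [[-1]], 1, 'Filas'): A returns [[False]], B returns [[False]]
import Mathlib
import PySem

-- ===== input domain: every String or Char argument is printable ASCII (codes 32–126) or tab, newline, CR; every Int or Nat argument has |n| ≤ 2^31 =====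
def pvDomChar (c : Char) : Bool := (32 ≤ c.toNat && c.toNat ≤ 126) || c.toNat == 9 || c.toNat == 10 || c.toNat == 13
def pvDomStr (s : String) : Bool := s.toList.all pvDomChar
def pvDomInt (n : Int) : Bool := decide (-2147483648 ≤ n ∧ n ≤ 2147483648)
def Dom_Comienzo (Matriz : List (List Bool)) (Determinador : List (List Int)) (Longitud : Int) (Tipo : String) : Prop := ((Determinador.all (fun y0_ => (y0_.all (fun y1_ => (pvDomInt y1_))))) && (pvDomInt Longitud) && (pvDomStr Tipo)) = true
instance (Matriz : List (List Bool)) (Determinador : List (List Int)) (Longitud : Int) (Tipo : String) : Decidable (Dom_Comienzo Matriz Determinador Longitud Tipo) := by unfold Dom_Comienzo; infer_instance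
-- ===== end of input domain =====

-- B rebuilds the matrix functionally, classifying every cell independently from the clue
-- placement arithmetic, instead of A's imperative block-walk writes (objective: alternative).
-- A mutates Matriz in place; B builds a new matrix: the equivalence proved here is about the
-- returned value.

-- A's write primitive: 'Matriz[r][c] = v'. Exact for indices Python accepts (including
-- negative in-range ones); where Python raises IndexError it is a no-op — those inputs are
-- excluded by Pre_Comienzo.
def pvWrite (M : List (List Bool)) (r c : Int) (v : Bool) : List (List Bool) :=
  PySem.List.pySetD M r (PySem.List.pySetD (PySem.List.pyGetD M r []) c v)

-- ===== PORT A =====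
def Comienzo (Matriz : List (List Bool)) (Determinador : List (List Int)) (Longitud : Int) (Tipo : String) : List (List Bool) :=
  (PySem.List.pyRange 0 Longitud 1).foldl (fun M i =>
    let row := PySem.List.pyGetD Determinador i []
    let nd : Int := row.length
    let tam := (PySem.List.pyRange 0 nd 1).foldl (fun t j => t + PySem.List.pyGetD row j 0) (nd - 1)
    let esp := Longitud - tam
    ((PySem.List.pyRange 0 nd 1).foldl (fun (s : List (List Bool) × Int) j =>
        let d := PySem.List.pyGetD row j 0
        (((PySem.List.pyRange 0 (d + 1) 1).foldl (fun (p : List (List Bool) × Int) k =>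
            if p.2 < d - esp then
              (if Tipo = "Filas" then pvWrite p.1 i (s.2 + k) true
               else if Tipo = "Columnas" then pvWrite p.1 (s.2 + k) i true
               else p.1, p.2 + 1)
            else if tam = Longitud ∧ j ≠ nd - 1 then
              (if Tipo = "Filas" then pvWrite p.1 i (s.2 + k) false
               else if Tipo = "Columnas" then pvWrite p.1 (s.2 + k) i false
               else p.1, p.2 + 1)
            else p) (s.1, 0)).1, s.2 + d + 1)) (M, esp)).1) Matriz

-- ===== PORT B =====
-- Source B's _cell: scan the blocks; a cell is True if it lies in the overlap of some block's
-- leftmost and rightmost placements, False if it is the forced separator of a line the clues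
-- fill exactly, otherwise it keeps its old value.
def pvCellGo : List Int → Int → Int → Int → Bool → Int → Int → Bool
  | [], _, _, _, old, _, _ => old
  | L :: rest, esp, n, pos, old, j, s =>
      if s + esp ≤ pos ∧ pos < s + L then true
      else if esp = 0 ∧ j ≠ n - 1 ∧ pos = s + L then false
      else pvCellGo rest esp n pos old (j + 1) (s + L + 1)

def pvCell (clues : List Int) (Longitud pos : Int) (old : Bool) : Bool :=
  pvCellGo clues (Longitud - ((clues.length : Int) - 1 + clues.sum)) (clues.length : Int) pos old 0 0

def Comienzo_alt (Matriz : List (List Bool)) (Determinador : List (List Int)) (Longitud : Int) (Tipo : String) : List (List Bool) :=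
  if Tipo = "Filas" then
    (PySem.List.enumerate Matriz 0).map (fun ir =>
      if ir.1 < Longitud then
        (PySem.List.enumerate ir.2 0).map (fun cv =>
          pvCell (PySem.List.pyGetD Determinador ir.1 []) Longitud cv.1 cv.2)
      else ir.2)
  else if Tipo = "Columnas" then
    (PySem.List.enumerate Matriz 0).map (fun ir =>
      (PySem.List.enumerate ir.2 0).map (fun cv =>
        if cv.1 < Longitud then pvCell (PySem.List.pyGetD Determinador cv.1 []) Longitud ir.1 cv.2
        else cv.2))
  else Matriz

-- ===== PRECONDITION & SPEC =====
-- Pre_ restricts to well-formed nonogram instances (the natural domain): the matrix covers the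
-- Longitud×Longitud board and every used clue row is nonnegative and fits in the line.  Outside
-- it Python A either raises IndexError or writes cells through negative-index wraparound, an
-- artefact a fresh implementation does not reproduce.
def Pre_Comienzo (Matriz : List (List Bool)) (Determinador : List (List Int)) (Longitud : Int) (Tipo : String) : Prop :=
  Longitud ≤ (Determinador.length : Int) ∧
  ((Tipo = "Filas" ∨ Tipo = "Columnas") →
    Longitud ≤ (Matriz.length : Int) ∧
    (∀ r : Nat, r < Longitud.toNat → Longitud ≤ ((Matriz.getD r []).length : Int)) ∧
    (∀ i : Nat, i < Longitud.toNat →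
      (∀ x ∈ Determinador.getD i [], 0 ≤ x) ∧
      (Determinador.getD i []).sum + ((Determinador.getD i []).length : Int) - 1 ≤ Longitud))
instance (Matriz : List (List Bool)) (Determinador : List (List Int)) (Longitud : Int) (Tipo : String) : Decidable (Pre_Comienzo Matriz Determinador Longitud Tipo) := by unfold Pre_Comienzo; infer_instance

def pvWitness_Comienzo : List (List Bool) × List (List Int) × Int × String :=
  ([[false, false], [false, false]], [[2], [1]], 2, "Filas")

def Spec_Comienzo (Matriz : List (List Bool)) (Determinador : List (List Int)) (Longitud : Int) (Tipo : String) (out : List (List Bool)) : Prop := out = Comienzo_alt Matriz Determinador Longitud Tipo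
instance (Matriz : List (List Bool)) (Determinador : List (List Int)) (Longitud : Int) (Tipo : String) (out : List (List Bool)) : Decidable (Spec_Comienzo Matriz Determinador Longitud Tipo out) := by unfold Spec_Comienzo; infer_instance

-- ===== CLAIM (what is proved, stated in full; the proofs are below) =====
def Claim_equal_Comienzo : Prop := ∀ (Matriz : List (List Bool)) (Determinador : List (List Int)) (Longitud : Int) (Tipo : String), Dom_Comienzo Matriz Determinador Longitud Tipo → Pre_Comienzo Matriz Determinador Longitud Tipo → Spec_Comienzo Matriz Determinador Longitud Tipo (Comienzo Matriz Determinador Longitud Tipo)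

-- ===== LEMMAS AND PROOFS =====

-- a fold whose step never changes the first component leaves it unchanged
theorem pv_foldl_fst_const {α β γ : Type} (f : α × β → γ → α × β)
    (h : ∀ p x, (f p x).1 = p.1) : ∀ (l : List γ) (p : α × β), (l.foldl f p).1 = p.1 := by
  intro l
  induction l with
  | nil => intro p; rfl
  | cons x xs ih => intro p; simpa [List.foldl_cons, h] using ih (f p x)

-- a fold whose step is the identity on the accumulator
theorem pv_foldl_id {α γ : Type} (f : α → γ → α) (l : List γ) (a : α)
    (h : ∀ (b : α) (x : γ), x ∈ l → f b x = b) : l.foldl f a = a := by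
  induction l generalizing a with
  | nil => rfl
  | cons x xs ih =>
      rw [List.foldl_cons, h a x (by simp)]
      exact ih a (fun b y hy => h b y (by simp [hy]))

-- filling [a, b) with True through an abstract line writer
def pvFillT (w : List (List Bool) → Int → Bool → List (List Bool))
    (M : List (List Bool)) (a b : Int) : List (List Bool) :=
  (PySem.List.pyRange a b 1).foldl (fun m c => w m c true) M

theorem pvFillT_succ (w : List (List Bool) → Int → Bool → List (List Bool))
    (M : List (List Bool)) (a u : Int) (h : 0 ≤ u) :
    pvFillT w M a (a + u + 1) = w (pvFillT w M a (a + u)) (a + u) true := by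
  unfold pvFillT
  rw [show a + u + 1 = (a + u) + 1 by ring, PySem.List.pyRange_one_succ_right (by omega)]
  simp

theorem pvFillT_nil (w : List (List Bool) → Int → Bool → List (List Bool))
    (M : List (List Bool)) (a b : Int) (h : b ≤ a) : pvFillT w M a b = M := by
  unfold pvFillT
  rw [PySem.List.pyRange_one_eq_nil h]
  rfl

-- A's k-loop, no-gap case: writes exactly the overlap prefix, Mini_contador = max 0 (min m t)
theorem pv_kloop_nogap (w : List (List Bool) → Int → Bool → List (List Bool))
    (t cnt : Int) (gapb : Prop) [inst : Decidable gapb] (hb : ¬ gapb) (m : Nat)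
    (M : List (List Bool)) :
    ((List.range m).foldl (fun (p : List (List Bool) × Int) (k : Nat) =>
        if p.2 < t then (w p.1 (cnt + (k : Int)) true, p.2 + 1)
        else if gapb then (w p.1 (cnt + (k : Int)) false, p.2 + 1)
        else p) (M, 0))
      = (pvFillT w M cnt (cnt + max 0 (min (m : Int) t)), max 0 (min (m : Int) t)) := by
  induction m with
  | zero =>
      simp only [List.range_zero, List.foldl_nil, Nat.cast_zero]
      rw [show max 0 (min (0 : Int) t) = 0 by omega, add_zero,
        pvFillT_nil w M cnt cnt le_rfl]
  | succ m ih =>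
      rw [List.range_succ, List.foldl_append, ih]
      simp only [List.foldl_cons, List.foldl_nil]
      by_cases hmt : (m : Int) < t
      · have h1 : max 0 (min (m : Int) t) = (m : Int) := by omega
        have h2 : max 0 (min ((m : Int) + 1) t) = (m : Int) + 1 := by omega
        rw [h1, if_pos (show (m : Int) < t from hmt)]
        push_cast
        rw [h2, show cnt + ((m : Int) + 1) = cnt + (m : Int) + 1 by ring,
          pvFillT_succ w M cnt (m : Int) (by omega)]
      · have h1 : ¬ (max 0 (min (m : Int) t) < t) := by omega
        have h2 : max 0 (min ((m : Int) + 1) t) = max 0 (min (m : Int) t) := by omega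
        rw [if_neg h1, if_neg hb]
        push_cast
        rw [h2]

-- A's k-loop, gap case (loop length d+1): overlap prefix then one False at cnt+d
theorem pv_kloop_gap (w : List (List Bool) → Int → Bool → List (List Bool))
    (d cnt : Int) (gapb : Prop) [inst : Decidable gapb] (hb : gapb) (hd : 0 ≤ d)
    (m : Nat) (hm : (m : Int) ≤ d + 1) (M : List (List Bool)) :
    ((List.range m).foldl (fun (p : List (List Bool) × Int) (k : Nat) =>
        if p.2 < d then (w p.1 (cnt + (k : Int)) true, p.2 + 1)
        else if gapb then (w p.1 (cnt + (k : Int)) false, p.2 + 1)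
        else p) (M, 0))
      = ((if (m : Int) = d + 1 then w (pvFillT w M cnt (cnt + d)) (cnt + d) false
          else pvFillT w M cnt (cnt + min (m : Int) d)), (m : Int)) := by
  induction m with
  | zero =>
      simp only [List.range_zero, List.foldl_nil, Nat.cast_zero]
      rw [if_neg (by omega : ¬ ((0 : Int) = d + 1)), show min (0 : Int) d = 0 by omega,
        add_zero, pvFillT_nil w M cnt cnt le_rfl]
  | succ m ih =>
      have hm' : (m : Int) ≤ d + 1 := by push_cast at hm ⊢; omega
      rw [List.range_succ, List.foldl_append, ih hm']
      have hmd : ¬ ((m : Int) = d + 1) := by push_cast at hm; omega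
      rw [if_neg hmd]
      simp only [List.foldl_cons, List.foldl_nil]
      by_cases hlt : (m : Int) < d
      · rw [if_pos hlt]
        push_cast
        rw [if_neg (by omega : ¬ ((m : Int) + 1 = d + 1)),
          show min (m : Int) d = (m : Int) by omega,
          show min ((m : Int) + 1) d = (m : Int) + 1 by omega,
          show cnt + ((m : Int) + 1) = cnt + (m : Int) + 1 by ring,
          pvFillT_succ w M cnt (m : Int) (by omega)]
      · have hme : (m : Int) = d := by push_cast at hm; omega
        rw [if_neg hlt, if_pos hb]
        push_cast
        rw [if_pos (by omega : (m : Int) + 1 = d + 1),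
          show min (m : Int) d = d by omega, hme]

-- A's whole per-block loop equals the direct fill (+ optional gap cell)
theorem pv_block (w : List (List Bool) → Int → Bool → List (List Bool))
    (d esp cnt : Int) (gapb : Prop) [inst : Decidable gapb] (M : List (List Bool))
    (hd : 0 ≤ d) (hesp : 0 ≤ esp) (hg : gapb → esp = 0) :
    ((PySem.List.pyRange 0 (d + 1) 1).foldl (fun (p : List (List Bool) × Int) k =>
        if p.2 < d - esp then (w p.1 (cnt + k) true, p.2 + 1)
        else if gapb then (w p.1 (cnt + k) false, p.2 + 1)
        else p) (M, 0)).1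
      = (if gapb then w (pvFillT w M cnt (cnt + d - esp)) (cnt + d) false
         else pvFillT w M cnt (cnt + d - esp)) := by
  rw [PySem.List.pyRange_one]
  simp only [List.foldl_map, zero_add, sub_zero]
  have h1 : ((d + 1).toNat : Int) = d + 1 := by omega
  by_cases hb : gapb
  · have hesp0 : esp = 0 := hg hb
    subst hesp0
    simp only [sub_zero]
    rw [pv_kloop_gap w d cnt gapb hb hd (d + 1).toNat (by omega) M,
      if_pos hb, if_pos h1]
  · rw [pv_kloop_nogap w (d - esp) cnt gapb hb (d + 1).toNat M, if_neg hb]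
    by_cases ht : 0 ≤ d - esp
    · rw [show max 0 (min (((d + 1).toNat : Int)) (d - esp)) = d - esp by omega]
      ring_nf
    · rw [show max 0 (min (((d + 1).toNat : Int)) (d - esp)) = 0 by omega,
        add_zero, pvFillT_nil w M cnt cnt le_rfl, pvFillT_nil w M cnt (cnt + d - esp) (by omega)]

-- A's per-line double loop equals the enumerate-based block-range fold, for an abstract writer
theorem pv_generic (w : Int → List (List Bool) → Int → Bool → List (List Bool))
    (D : List (List Int)) (L : Int) (M : List (List Bool))
    (hrows : ∀ i : Nat, i < L.toNat →
      (∀ x ∈ D.getD i [], 0 ≤ x) ∧ (D.getD i []).sum + ((D.getD i []).length : Int) - 1 ≤ L) :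
    ((PySem.List.pyRange 0 L 1).foldl (fun M i =>
      let row := PySem.List.pyGetD D i []
      let nd : Int := row.length
      let tam := (PySem.List.pyRange 0 nd 1).foldl (fun t j => t + PySem.List.pyGetD row j 0) (nd - 1)
      let esp := L - tam
      ((PySem.List.pyRange 0 nd 1).foldl (fun (s : List (List Bool) × Int) j =>
          let d := PySem.List.pyGetD row j 0
          (((PySem.List.pyRange 0 (d + 1) 1).foldl (fun (p : List (List Bool) × Int) k =>
              if p.2 < d - esp then (w i p.1 (s.2 + k) true, p.2 + 1)
              else if tam = L ∧ j ≠ nd - 1 then (w i p.1 (s.2 + k) false, p.2 + 1)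
              else p) (s.1, 0)).1, s.2 + d + 1)) (M, esp)).1) M)
    = ((PySem.List.pyRange 0 L 1).foldl (fun M i =>
      let clues := PySem.List.pyGetD D i []
      let n : Int := clues.length
      let tam := n - 1 + clues.sum
      let esp := L - tam
      ((PySem.List.enumerate clues 0).foldl (fun (s : List (List Bool) × Int) jL =>
          let M1 := (PySem.List.pyRange s.2 (s.2 + jL.2 - esp) 1).foldl
              (fun m c => w i m c true) s.1
          let M2 := if tam = L ∧ jL.1 ≠ n - 1 then w i M1 (s.2 + jL.2) false else M1
          (M2, s.2 + jL.2 + 1)) (M, esp)).1) M) := by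
  apply PySem.List.foldl_congr_mem
  intro Macc i hi
  rw [PySem.List.mem_pyRange_one] at hi
  obtain ⟨hi0, hiL⟩ := hi
  obtain ⟨hnn, hfit⟩ := hrows i.toNat (by omega)
  rw [← PySem.List.pyGetD_of_nonneg D [] hi0] at hnn hfit
  dsimp only
  set row := PySem.List.pyGetD D i [] with hrowdef
  rw [PySem.List.foldl_pyRange_zero_pyGetD' row 0 (fun acc x => acc + x) ((row.length : Int) - 1),
    PySem.List.foldl_add row (fun x => x) ((row.length : Int) - 1), List.map_id']
  rw [PySem.List.enumerate_eq_map_pyRange row 0, List.foldl_map]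
  simp only [PySem.List.len_eq]
  congr 1
  apply PySem.List.foldl_congr_mem
  intro s j hj
  rw [PySem.List.mem_pyRange_one] at hj
  dsimp only
  have hd : 0 ≤ PySem.List.pyGetD row j 0 :=
    hnn _ (PySem.List.pyGetD_mem row 0 (by constructor <;> omega))
  have hesp : 0 ≤ L - ((row.length : Int) - 1 + row.sum) := by omega
  refine Prod.ext ?_ rfl
  rw [pv_block (w i) (PySem.List.pyGetD row j 0) (L - ((row.length : Int) - 1 + row.sum)) s.2
      ((row.length : Int) - 1 + row.sum = L ∧ j ≠ (row.length : Int) - 1) s.1 hd hesp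
      (fun hg => by omega)]
  unfold pvFillT
  split <;> ring_nf

-- ---------- the write list of one line, and its application ----------

-- the (position, value) writes A performs on one line, block by block
def pvLWGo : List Int → Int → Int → Int → Int → List (Int × Bool)
  | [], _, _, _, _ => []
  | L :: rest, esp, n, j, cnt =>
      (PySem.List.pyRange cnt (cnt + L - esp) 1).map (fun c => (c, true))
      ++ (if esp = 0 ∧ j ≠ n - 1 then [(cnt + L, false)] else [])
      ++ pvLWGo rest esp n (j + 1) (cnt + L + 1)

def pvOrient (filas : Bool) (i : Int) (pv : Int × Bool) : Int × Int × Bool :=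
  if filas then (i, pv.1, pv.2) else (pv.1, i, pv.2)

def pvEsp (D : List (List Int)) (Lng i : Int) : Int :=
  Lng - (((PySem.List.pyGetD D i []).length : Int) - 1 + (PySem.List.pyGetD D i []).sum)

def pvLineWs (D : List (List Int)) (Lng : Int) (filas : Bool) (i : Int) : List (Int × Int × Bool) :=
  (pvLWGo (PySem.List.pyGetD D i []) (pvEsp D Lng i)
      ((PySem.List.pyGetD D i []).length : Int) 0 (pvEsp D Lng i)).map (pvOrient filas i)

def pvAllWs (D : List (List Int)) (Lng : Int) (filas : Bool) : List (Int × Int × Bool) :=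
  (PySem.List.pyRange 0 Lng 1).flatMap (pvLineWs D Lng filas)

def pvWapp (M : List (List Bool)) (t : Int × Int × Bool) : List (List Bool) :=
  pvWrite M t.1 t.2.1 t.2.2

def pvApply (ws : List (Int × Int × Bool)) (M : List (List Bool)) : List (List Bool) :=
  ws.foldl pvWapp M

def pvMget (M : List (List Bool)) (k l : Nat) : Bool := (M.getD k []).getD l false

-- the block-range fold of one line is the application of that line's write list
theorem pv_emit_apply (w : List (List Bool) → Int → Bool → List (List Bool)) (esp n : Int) :
    ∀ (clues : List Int) (j cnt : Int) (M : List (List Bool)),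
    ((PySem.List.enumerate clues j).foldl (fun (s : List (List Bool) × Int) jL =>
        (if esp = 0 ∧ jL.1 ≠ n - 1 then
           w ((PySem.List.pyRange s.2 (s.2 + jL.2 - esp) 1).foldl (fun m c => w m c true) s.1)
             (s.2 + jL.2) false
         else (PySem.List.pyRange s.2 (s.2 + jL.2 - esp) 1).foldl (fun m c => w m c true) s.1,
         s.2 + jL.2 + 1)) (M, cnt)).1
    = (pvLWGo clues esp n j cnt).foldl (fun m pv => w m pv.1 pv.2) M := by
  intro clues
  induction clues with
  | nil => intro j cnt M; rfl
  | cons L rest ih =>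
      intro j cnt M
      rw [PySem.List.enumerate_cons, List.foldl_cons]
      dsimp only
      rw [ih (j + 1) (cnt + L + 1)]
      show _ = (((PySem.List.pyRange cnt (cnt + L - esp) 1).map (fun c => (c, true))
          ++ (if esp = 0 ∧ j ≠ n - 1 then [(cnt + L, false)] else []))
          ++ pvLWGo rest esp n (j + 1) (cnt + L + 1)).foldl (fun m pv => w m pv.1 pv.2) M
      rw [List.foldl_append, List.foldl_append, List.foldl_map]
      by_cases hg : esp = 0 ∧ j ≠ n - 1
      · rw [if_pos hg, if_pos hg, List.foldl_cons, List.foldl_nil]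
      · rw [if_neg hg, if_neg hg, List.foldl_nil]

-- ---------- pointwise effect of a write list ----------

theorem pv_getD_set {α : Type} (l : List α) (n : Nat) (a d : α) (m : Nat) :
    (l.set n a).getD m d = if n = m ∧ n < l.length then a else l.getD m d := by
  simp only [List.getD_eq_getElem?_getD, List.getElem?_set]
  split_ifs with h1 h2 <;> simp_all <;> omega

theorem pvWrite_length (M : List (List Bool)) (r c : Int) (v : Bool) (hr : 0 ≤ r) :
    (pvWrite M r c v).length = M.length := by
  unfold pvWrite
  rw [PySem.List.pySetD_of_nonneg _ _ hr, List.length_set]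

theorem pvWrite_row_length (M : List (List Bool)) (r c : Int) (v : Bool) (hr : 0 ≤ r) (k : Nat) :
    ((pvWrite M r c v).getD k []).length = (M.getD k []).length := by
  unfold pvWrite
  rw [PySem.List.pySetD_of_nonneg _ _ hr, pv_getD_set]
  split_ifs with h
  · rw [PySem.List.length_pySetD, PySem.List.pyGetD_of_nonneg _ _ hr, h.1]
  · rfl

theorem pvWrite_mget (M : List (List Bool)) (r c : Int) (v : Bool)
    (hr0 : 0 ≤ r) (hrl : r < (M.length : Int))
    (hc0 : 0 ≤ c) (hcl : c < (((M.getD r.toNat []).length : Int))) (k l : Nat) :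
    pvMget (pvWrite M r c v) k l =
      if r = (k : Int) ∧ c = (l : Int) then v else pvMget M k l := by
  unfold pvWrite pvMget
  rw [PySem.List.pySetD_of_nonneg _ _ hr0, PySem.List.pySetD_of_nonneg _ _ hc0,
    PySem.List.pyGetD_of_nonneg _ _ hr0, pv_getD_set]
  by_cases h1 : r.toNat = k ∧ r.toNat < M.length
  · rw [if_pos h1, pv_getD_set, h1.1]
    by_cases h2 : c.toNat = l ∧ c.toNat < (M.getD k []).length
    · rw [if_pos h2, if_pos (by omega)]
    · rw [if_neg h2, if_neg (by
        rw [← h1.1] at h2 ⊢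
        intro hrc
        exact h2 ⟨by omega, by omega⟩)]
  · rw [if_neg h1, if_neg (by
      intro hrc
      exact h1 ⟨by omega, by omega⟩)]

theorem pvApply_length (ws : List (Int × Int × Bool)) (M : List (List Bool))
    (h : ∀ t ∈ ws, 0 ≤ t.1) : (pvApply ws M).length = M.length := by
  induction ws generalizing M with
  | nil => rfl
  | cons t ws ih =>
      unfold pvApply at *
      rw [List.foldl_cons, ih _ (fun u hu => h u (by simp [hu]))]
      exact pvWrite_length M t.1 t.2.1 t.2.2 (h t (by simp))

theorem pvApply_row_length (ws : List (Int × Int × Bool)) (M : List (List Bool))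
    (h : ∀ t ∈ ws, 0 ≤ t.1) (k : Nat) :
    ((pvApply ws M).getD k []).length = (M.getD k []).length := by
  induction ws generalizing M with
  | nil => rfl
  | cons t ws ih =>
      unfold pvApply at *
      rw [List.foldl_cons, ih _ (fun u hu => h u (by simp [hu]))]
      exact pvWrite_row_length M t.1 t.2.1 t.2.2 (h t (by simp)) k

-- last-write-wins pointwise characterisation of an in-range write list
theorem pvApply_mget (ws : List (Int × Int × Bool)) (M : List (List Bool))
    (hws : ∀ t ∈ ws, 0 ≤ t.1 ∧ t.1 < (M.length : Int) ∧ 0 ≤ t.2.1 ∧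
      t.2.1 < (((M.getD t.1.toNat []).length : Int))) (k l : Nat) :
    pvMget (pvApply ws M) k l =
      ((ws.reverse.find? (fun t => t.1 == (k : Int) && t.2.1 == (l : Int))).map
        (fun t => t.2.2)).getD (pvMget M k l) := by
  induction ws using List.reverseRecOn with
  | nil => rfl
  | append_singleton ws t ih =>
      have hsub : ∀ u ∈ ws, 0 ≤ u.1 ∧ u.1 < (M.length : Int) ∧ 0 ≤ u.2.1 ∧
          u.2.1 < (((M.getD u.1.toNat []).length : Int)) :=
        fun u hu => hws u (by simp [hu])
      have ht := hws t (by simp)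
      have h0 : ∀ u ∈ ws, 0 ≤ u.1 := fun u hu => (hsub u hu).1
      have hlen : (pvApply ws M).length = M.length := pvApply_length ws M h0
      have hrow : ∀ k : Nat, ((pvApply ws M).getD k []).length = (M.getD k []).length :=
        pvApply_row_length ws M h0
      have hstep : pvApply (ws ++ [t]) M = pvWapp (pvApply ws M) t := by
        unfold pvApply; rw [List.foldl_append, List.foldl_cons, List.foldl_nil]
      rw [hstep, List.reverse_append, List.reverse_singleton, List.singleton_append,
        List.find?_cons]
      unfold pvWapp
      rw [pvWrite_mget (pvApply ws M) t.1 t.2.1 t.2.2 ht.1 (by rw [hlen]; exact ht.2.1)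
        ht.2.2.1 (by rw [hrow]; exact ht.2.2.2) k l]
      by_cases hp : t.1 = (k : Int) ∧ t.2.1 = (l : Int)
      · rw [if_pos hp]
        have : (t.1 == (k : Int) && t.2.1 == (l : Int)) = true := by
          simp [hp.1, hp.2]
        rw [this]
        rfl
      · rw [if_neg hp]
        have : (t.1 == (k : Int) && t.2.1 == (l : Int)) = false := by
          rcases not_and_or.mp hp with h | h <;> simp [beq_eq_false_iff_ne.mpr h]
        rw [this]
        exact ih hsub

-- ---------- structure of the write lists ----------

theorem pvLWGo_bounds (clues : List Int) (esp n j cnt : Int)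
    (hnn : ∀ x ∈ clues, 0 ≤ x) (hjn : n = j + clues.length) :
    ∀ pv ∈ pvLWGo clues esp n j cnt,
      cnt ≤ pv.1 ∧ pv.1 ≤ cnt + clues.sum + (clues.length : Int) - esp - 2 := by
  induction clues generalizing j cnt with
  | nil => intro pv hpv; cases hpv
  | cons L rest ih =>
      have hL : 0 ≤ L := hnn L (by simp)
      have hrest : ∀ x ∈ rest, 0 ≤ x := fun x hx => hnn x (by simp [hx])
      have hsum : 0 ≤ rest.sum := List.sum_nonneg hrest
      intro pv hpv
      rw [pvLWGo, List.append_assoc, List.mem_append, List.mem_append] at hpv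
      rcases hpv with hT | hG | hR
      · rcases List.mem_map.mp hT with ⟨c, hc, rfl⟩
        rw [PySem.List.mem_pyRange_one] at hc
        simp only [List.sum_cons, List.length_cons]
        push_cast
        omega
      · by_cases hcond : esp = 0 ∧ j ≠ n - 1
        · rw [if_pos hcond] at hG
          rcases List.mem_singleton.mp hG with rfl
          have hrlen : rest.length ≠ 0 := by
            intro h0
            exact hcond.2 (by rw [hjn, List.length_cons, h0]; push_cast; ring)
          simp only [List.sum_cons, List.length_cons]
          push_cast
          omega
        · rw [if_neg hcond] at hG
          cases hG
      · have := ih (j + 1) (cnt + L + 1) hrest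
          (by rw [List.length_cons] at hjn; push_cast at hjn ⊢; omega) pv hR
        simp only [List.sum_cons, List.length_cons]
        push_cast at this ⊢
        omega

theorem pvLWGo_pairwise (clues : List Int) (esp n j cnt : Int)
    (hnn : ∀ x ∈ clues, 0 ≤ x) (hjn : n = j + clues.length) (hesp : 0 ≤ esp) :
    (pvLWGo clues esp n j cnt).Pairwise (fun a b => a.1 < b.1) := by
  induction clues generalizing j cnt with
  | nil => exact List.Pairwise.nil
  | cons L rest ih =>
      have hL : 0 ≤ L := hnn L (by simp)
      have hrest : ∀ x ∈ rest, 0 ≤ x := fun x hx => hnn x (by simp [hx])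
      have hjn' : n = (j + 1) + (rest.length : Int) := by
        rw [List.length_cons] at hjn; push_cast at hjn ⊢; omega
      have hlb := pvLWGo_bounds rest esp n (j + 1) (cnt + L + 1) hrest hjn'
      rw [pvLWGo, List.append_assoc, List.pairwise_append]
      refine ⟨?_, ?_, ?_⟩
      · exact List.pairwise_map.mpr (PySem.List.pairwise_lt_pyRange_one _ _)
      · rw [List.pairwise_append]
        refine ⟨?_, ih (j + 1) (cnt + L + 1) hrest hjn', ?_⟩
        · split_ifs <;> simp
        · intro a ha b hb
          have hblb := (hlb b hb).1
          by_cases hcond : esp = 0 ∧ j ≠ n - 1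
          · rw [if_pos hcond] at ha
            rcases List.mem_singleton.mp ha with rfl
            omega
          · rw [if_neg hcond] at ha
            cases ha
      · intro a ha b hb
        rcases List.mem_map.mp ha with ⟨c, hc, rfl⟩
        rw [PySem.List.mem_pyRange_one] at hc
        rw [List.mem_append] at hb
        rcases hb with hbG | hbR
        · by_cases hcond : esp = 0 ∧ j ≠ n - 1
          · rw [if_pos hcond] at hbG
            rcases List.mem_singleton.mp hbG with rfl
            simp only
            omega
          · rw [if_neg hcond] at hbG
            cases hbG
        · have hblb := (hlb b hbR).1
          simp only
          omega

theorem pv_eq_of_pairwise_lt_fst {l : List (Int × Bool)}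
    (h : l.Pairwise (fun a b => a.1 < b.1)) {a b : Int × Bool}
    (ha : a ∈ l) (hb : b ∈ l) (hfst : a.1 = b.1) : a = b := by
  induction l with
  | nil => cases ha
  | cons x xs ih =>
      rcases List.pairwise_cons.mp h with ⟨hx, hxs⟩
      rcases List.mem_cons.mp ha with rfl | ha' <;> rcases List.mem_cons.mp hb with rfl | hb'
      · rfl
      · exact absurd hfst (by have := hx b hb'; omega)
      · exact absurd hfst (by have := hx a ha'; omega)
      · exact ih hxs ha' hb'

-- ---------- find? machinery ----------

theorem pv_find?_reverse {α : Type} (p : α → Bool) (l : List α)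
    (h : ∀ a ∈ l, ∀ b ∈ l, p a → p b → a = b) : l.reverse.find? p = l.find? p := by
  induction l with
  | nil => rfl
  | cons x xs ih =>
      rw [List.reverse_cons, List.find?_append,
        ih (fun a ha b hb pa pb => h a (by simp [ha]) b (by simp [hb]) pa pb)]
      cases hpx : p x with
      | true =>
          rw [List.find?_cons_of_pos hpx]
          cases hf : xs.find? p with
          | none => simp [List.find?_cons_of_pos hpx]
          | some y =>
              have hy := List.find?_some hf
              have hym := List.mem_of_find?_eq_some hf
              rw [h y (by simp [hym]) x (by simp) hy hpx]
              simp [List.find?_cons_of_pos hpx]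
      | false =>
          rw [List.find?_cons_of_neg (by simp [hpx])]
          simp [hpx]

theorem pv_find?_flatMap {β γ : Type} (l : List β) (g : β → List γ) (p : γ → Bool) (b : β)
    (hb : b ∈ l) (hnd : l.Nodup)
    (hothers : ∀ b' ∈ l, b' ≠ b → (g b').find? p = none) :
    (l.flatMap g).find? p = (g b).find? p := by
  induction l with
  | nil => cases hb
  | cons x xs ih =>
      rw [List.flatMap_cons, List.find?_append]
      rcases List.mem_cons.mp hb with rfl | hb'
      · have hnone : (xs.flatMap g).find? p = none := by
          rw [List.find?_eq_none]
          intro y hy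
          rcases List.mem_flatMap.mp hy with ⟨b', hb', hyb⟩
          have : (g b').find? p = none :=
            hothers b' (by simp [hb']) (by rintro rfl; exact (List.nodup_cons.mp hnd).1 hb')
          exact fun hp => by
            have := List.find?_eq_none.mp this y hyb
            exact this hp
        rw [hnone]
        cases hgb : (g b).find? p <;> simp
      · have hx : (g x).find? p = none :=
          hothers x (by simp) (by rintro rfl; exact (List.nodup_cons.mp hnd).1 hb')
        rw [hx]
        have := ih hb' (List.nodup_cons.mp hnd).2
          (fun b' hb'' hne => hothers b' (by simp [hb'']) hne)
        simpa using this

theorem pv_find?_eq_self (l : List Int) (x : Int) :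
    l.find? (fun c => c == x) = if x ∈ l then some x else none := by
  induction l with
  | nil => rfl
  | cons a l ih =>
      by_cases hax : a = x
      · subst hax; simp [List.find?_cons_of_pos]
      · rw [List.find?_cons_of_neg (by simp [hax]), ih]
        by_cases hx : x ∈ l
        · rw [if_pos hx, if_pos (List.mem_cons.mpr (Or.inr hx))]
        · rw [if_neg hx, if_neg (by
            rw [List.mem_cons]
            rintro (rfl | h)
            · exact hax rfl
            · exact hx h)]

theorem pv_find?_range_true (a b pos : Int) :
    ((PySem.List.pyRange a b 1).map (fun c => (c, true))).find? (fun pv => pv.1 == pos)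
    = if a ≤ pos ∧ pos < b then some (pos, true) else none := by
  rw [List.find?_map,
    show ((fun pv : Int × Bool => pv.1 == pos) ∘ (fun c => (c, true))) = fun c => c == pos
      from rfl,
    pv_find?_eq_self]
  by_cases h : a ≤ pos ∧ pos < b
  · rw [if_pos (PySem.List.mem_pyRange_one.mpr h), if_pos h]; rfl
  · rw [if_neg (fun hm => h (PySem.List.mem_pyRange_one.mp hm)), if_neg h]; rfl

-- ---------- the scan of B's _cell is the lookup in the write list ----------

theorem pv_cell_lookup (clues : List Int) (esp n : Int) (pos : Int) (old : Bool) :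
    ∀ (j s : Int),
    pvCellGo clues esp n pos old j s =
      (((pvLWGo clues esp n j (s + esp)).find? (fun pv => pv.1 == pos)).map
        (fun pv => pv.2)).getD old := by
  induction clues with
  | nil => intro j s; rfl
  | cons L rest ih =>
      intro j s
      rw [pvLWGo, List.append_assoc, List.find?_append, pv_find?_range_true]
      by_cases hT : s + esp ≤ pos ∧ pos < s + esp + L - esp
      · rw [if_pos hT]
        rw [show pvCellGo (L :: rest) esp n pos old j s =
          (if s + esp ≤ pos ∧ pos < s + L then true
           else if esp = 0 ∧ j ≠ n - 1 ∧ pos = s + L then false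
           else pvCellGo rest esp n pos old (j + 1) (s + L + 1)) from rfl]
        rw [if_pos (by omega)]
        rfl
      · rw [if_neg hT]
        rw [show pvCellGo (L :: rest) esp n pos old j s =
          (if s + esp ≤ pos ∧ pos < s + L then true
           else if esp = 0 ∧ j ≠ n - 1 ∧ pos = s + L then false
           else pvCellGo rest esp n pos old (j + 1) (s + L + 1)) from rfl]
        rw [if_neg (by omega)]
        rw [List.find?_append]
        by_cases hg : esp = 0 ∧ j ≠ n - 1
        · rw [if_pos hg]
          by_cases hpos : pos = s + L
          · rw [if_pos ⟨hg.1, hg.2, hpos⟩]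
            rw [List.find?_singleton, show ((s + esp + L == pos) = true) by
              simp [hg.1, hpos]]
            rfl
          · rw [if_neg (by intro h; exact hpos h.2.2)]
            rw [List.find?_singleton, show ((s + esp + L == pos) = false) by
              simp [hg.1]; omega]
            rw [ih (j + 1) (s + L + 1),
              show s + esp + L + 1 = s + L + 1 + esp by ring]
            rfl
        · rw [if_neg hg, if_neg (by intro h; exact hg ⟨h.1, h.2.1⟩)]
          rw [ih (j + 1) (s + L + 1), show s + esp + L + 1 = s + L + 1 + esp by ring]
          rfl

-- the block-range fold over all lines is the application of the full oriented write list
theorem pv_oldB_apply (w : Int → List (List Bool) → Int → Bool → List (List Bool))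
    (filas : Bool) (hw : ∀ i m p v, w i m p v = pvWapp m (pvOrient filas i (p, v)))
    (D : List (List Int)) (L : Int) (M : List (List Bool)) :
    ((PySem.List.pyRange 0 L 1).foldl (fun M i =>
      let clues := PySem.List.pyGetD D i []
      let n : Int := clues.length
      let tam := n - 1 + clues.sum
      let esp := L - tam
      ((PySem.List.enumerate clues 0).foldl (fun (s : List (List Bool) × Int) jL =>
          let M1 := (PySem.List.pyRange s.2 (s.2 + jL.2 - esp) 1).foldl
              (fun m c => w i m c true) s.1
          let M2 := if tam = L ∧ jL.1 ≠ n - 1 then w i M1 (s.2 + jL.2) false else M1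
          (M2, s.2 + jL.2 + 1)) (M, esp)).1) M)
    = pvApply (pvAllWs D L filas) M := by
  unfold pvApply pvAllWs
  rw [List.foldl_flatMap]
  apply PySem.List.foldl_congr_mem
  intro Macc i _
  dsimp only
  have h1 : ((PySem.List.enumerate (PySem.List.pyGetD D i []) 0).foldl
      (fun (s : List (List Bool) × Int) jL =>
        ((if pvEsp D L i = 0 ∧ jL.1 ≠ ((PySem.List.pyGetD D i []).length : Int) - 1 then
            w i ((PySem.List.pyRange s.2 (s.2 + jL.2 - pvEsp D L i) 1).foldl
              (fun m c => w i m c true) s.1) (s.2 + jL.2) false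
          else (PySem.List.pyRange s.2 (s.2 + jL.2 - pvEsp D L i) 1).foldl
              (fun m c => w i m c true) s.1),
         s.2 + jL.2 + 1)) (Macc, pvEsp D L i)).1
      = (pvLWGo (PySem.List.pyGetD D i []) (pvEsp D L i)
          ((PySem.List.pyGetD D i []).length : Int) 0 (pvEsp D L i)).foldl
          (fun m pv => w i m pv.1 pv.2) Macc :=
    pv_emit_apply (w i) (pvEsp D L i) ((PySem.List.pyGetD D i []).length : Int)
      (PySem.List.pyGetD D i []) 0 (pvEsp D L i) Macc
  have h2 : (pvLWGo (PySem.List.pyGetD D i []) (pvEsp D L i)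
        ((PySem.List.pyGetD D i []).length : Int) 0 (pvEsp D L i)).foldl
        (fun m pv => w i m pv.1 pv.2) Macc
      = (pvLineWs D L filas i).foldl pvWapp Macc := by
    unfold pvLineWs
    rw [List.foldl_map]
    apply PySem.List.foldl_congr_mem
    intro m pv _
    exact hw i m pv.1 pv.2
  rw [← h2, ← h1]
  refine congrArg Prod.fst (PySem.List.foldl_congr_mem _ _ _ _ (fun s jL _ => ?_))
  dsimp only
  refine congrArg₂ Prod.mk ?_ rfl
  refine if_congr ?_ rfl rfl
  unfold pvEsp
  constructor
  · rintro ⟨hc, hj⟩; exact ⟨by omega, hj⟩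
  · rintro ⟨hc, hj⟩; exact ⟨by omega, hj⟩

-- Pre_'s per-line facts, phrased on Int line indices
def pvRowsOK (D : List (List Int)) (L : Int) : Prop :=
  ∀ i : Int, 0 ≤ i → i < L →
    (∀ x ∈ PySem.List.pyGetD D i [], 0 ≤ x) ∧
    (PySem.List.pyGetD D i []).sum + ((PySem.List.pyGetD D i []).length : Int) - 1 ≤ L

theorem pv_lineWs_shape (D : List (List Int)) (L : Int) (filas : Bool) (i : Int)
    (hOK : pvRowsOK D L) (h0 : 0 ≤ i) (hiL : i < L) :
    ∀ t ∈ pvLineWs D L filas i, ∃ pv, pv ∈ pvLWGo (PySem.List.pyGetD D i []) (pvEsp D L i)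
      ((PySem.List.pyGetD D i []).length : Int) 0 (pvEsp D L i) ∧
      t = pvOrient filas i pv ∧ 0 ≤ pv.1 ∧ pv.1 < L := by
  intro t ht
  rcases List.mem_map.mp ht with ⟨pv, hpv, rfl⟩
  obtain ⟨hnn, hfit⟩ := hOK i h0 hiL
  have hb := pvLWGo_bounds (PySem.List.pyGetD D i []) (pvEsp D L i)
    ((PySem.List.pyGetD D i []).length : Int) 0 (pvEsp D L i) hnn (by push_cast; ring) pv hpv
  have hesp : 0 ≤ pvEsp D L i := by unfold pvEsp; omega
  refine ⟨pv, hpv, rfl, ?_, ?_⟩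
  · omega
  · unfold pvEsp at hb
    omega

theorem pv_allWs_coords (D : List (List Int)) (L : Int) (filas : Bool) (hOK : pvRowsOK D L) :
    ∀ t ∈ pvAllWs D L filas, 0 ≤ t.1 ∧ t.1 < L ∧ 0 ≤ t.2.1 ∧ t.2.1 < L := by
  intro t ht
  rcases List.mem_flatMap.mp ht with ⟨i, hi, hti⟩
  rw [PySem.List.mem_pyRange_one] at hi
  rcases pv_lineWs_shape D L filas i hOK hi.1 hi.2 t hti with ⟨pv, _, rfl, hpv0, hpvL⟩
  cases filas <;> simp [pvOrient] <;> omega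

theorem pv_allWs_unique (D : List (List Int)) (L : Int) (filas : Bool) (hOK : pvRowsOK D L)
    (k l : Int) :
    ∀ a ∈ pvAllWs D L filas, ∀ b ∈ pvAllWs D L filas,
      (a.1 == k && a.2.1 == l) = true → (b.1 == k && b.2.1 == l) = true → a = b := by
  intro a ha b hb hpa hpb
  rcases List.mem_flatMap.mp ha with ⟨i1, hi1, hai⟩
  rcases List.mem_flatMap.mp hb with ⟨i2, hi2, hbi⟩
  rw [PySem.List.mem_pyRange_one] at hi1 hi2
  rcases pv_lineWs_shape D L filas i1 hOK hi1.1 hi1.2 a hai with ⟨pv1, hpv1, rfl, -, -⟩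
  rcases pv_lineWs_shape D L filas i2 hOK hi2.1 hi2.2 b hbi with ⟨pv2, hpv2, rfl, -, -⟩
  simp only [pvOrient, Bool.and_eq_true, beq_iff_eq] at hpa hpb
  have hesp1 : 0 ≤ pvEsp D L i1 := by
    obtain ⟨-, hfit⟩ := hOK i1 hi1.1 hi1.2; unfold pvEsp; omega
  cases filas with
  | true =>
      simp at hpa hpb
      have hi : i1 = i2 := by omega
      subst hi
      have hpw := pvLWGo_pairwise (PySem.List.pyGetD D i1 []) (pvEsp D L i1)
        ((PySem.List.pyGetD D i1 []).length : Int) 0 (pvEsp D L i1)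
        (hOK i1 hi1.1 hi1.2).1 (by push_cast; ring) hesp1
      have : pv1 = pv2 := pv_eq_of_pairwise_lt_fst hpw hpv1 hpv2 (by omega)
      rw [this]
  | false =>
      simp at hpa hpb
      have hi : i1 = i2 := by omega
      subst hi
      have hpw := pvLWGo_pairwise (PySem.List.pyGetD D i1 []) (pvEsp D L i1)
        ((PySem.List.pyGetD D i1 []).length : Int) 0 (pvEsp D L i1)
        (hOK i1 hi1.1 hi1.2).1 (by push_cast; ring) hesp1
      have : pv1 = pv2 := pv_eq_of_pairwise_lt_fst hpw hpv1 hpv2 (by omega)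
      rw [this]

-- the lookup in the full write list selects the single relevant line
theorem pv_find_allWs (D : List (List Int)) (L : Int) (filas : Bool) (hOK : pvRowsOK D L)
    (k l : Int) (hk0 : 0 ≤ k) (hl0 : 0 ≤ l) :
    (pvAllWs D L filas).find? (fun t => t.1 == k && t.2.1 == l)
    = (if h : (if filas then k else l) < L then
        ((pvLWGo (PySem.List.pyGetD D (if filas then k else l) [])
            (pvEsp D L (if filas then k else l))
            (((PySem.List.pyGetD D (if filas then k else l) []).length) : Int) 0
            (pvEsp D L (if filas then k else l))).find?
          (fun pv => pv.1 == (if filas then l else k))).map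
          (pvOrient filas (if filas then k else l))
      else none) := by
  have hsel0 : 0 ≤ (if filas then k else l) := by cases filas <;> simpa
  by_cases hsel : (if filas then k else l) < L
  · rw [dif_pos hsel]
    unfold pvAllWs
    rw [pv_find?_flatMap (PySem.List.pyRange 0 L 1) (pvLineWs D L filas)
      (fun t => t.1 == k && t.2.1 == l) (if filas then k else l)
      (PySem.List.mem_pyRange_one.mpr ⟨hsel0, hsel⟩) (PySem.List.nodup_pyRange_one 0 L)
      (fun i hi hne => by
        rw [List.find?_eq_none]
        intro t ht
        rcases List.mem_map.mp ht with ⟨pv, _, rfl⟩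
        cases filas with
        | true =>
            simp only [pvOrient, if_true, Bool.and_eq_true, beq_iff_eq]
            rintro ⟨rfl, -⟩
            exact hne (by simpa)
        | false =>
            simp only [pvOrient, Bool.and_eq_true, beq_iff_eq]
            rintro ⟨-, rfl⟩
            exact hne (by simpa))]
    unfold pvLineWs
    rw [List.find?_map]
    have hfun : ((fun t : Int × Int × Bool => t.1 == k && t.2.1 == l) ∘
        pvOrient filas (if filas then k else l))
        = fun pv : Int × Bool => pv.1 == (if filas then l else k) := by
      funext pv
      cases filas <;> simp [pvOrient]
    rw [hfun]
  · rw [dif_neg hsel]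
    unfold pvAllWs
    rw [List.find?_eq_none]
    intro t ht
    rcases List.mem_flatMap.mp ht with ⟨i, hi, hti⟩
    rw [PySem.List.mem_pyRange_one] at hi
    rcases List.mem_map.mp hti with ⟨pv, _, rfl⟩
    cases filas with
    | true =>
        simp only [pvOrient, if_true, Bool.and_eq_true, beq_iff_eq]
        rintro ⟨rfl, -⟩
        simp at hsel
        omega
    | false =>
        simp only [pvOrient, Bool.and_eq_true, beq_iff_eq]
        rintro ⟨-, rfl⟩
        simp at hsel
        omega

-- the applied write list, read pointwise, is exactly B's per-cell classification
theorem pv_apply_cell (D : List (List Int)) (L : Int) (M : List (List Bool)) (filas : Bool)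
    (hOK : pvRowsOK D L) (hML : L ≤ (M.length : Int))
    (hMrow : ∀ r : Nat, r < L.toNat → L ≤ ((M.getD r []).length : Int)) (k l : Nat) :
    pvMget (pvApply (pvAllWs D L filas) M) k l =
      if (if filas then (k : Int) else (l : Int)) < L then
        pvCell (PySem.List.pyGetD D (if filas then (k : Int) else (l : Int)) []) L
          (if filas then (l : Int) else (k : Int)) (pvMget M k l)
      else pvMget M k l := by
  have hcoords := pv_allWs_coords D L filas hOK
  have hws : ∀ t ∈ pvAllWs D L filas, 0 ≤ t.1 ∧ t.1 < (M.length : Int) ∧ 0 ≤ t.2.1 ∧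
      t.2.1 < ((M.getD t.1.toNat []).length : Int) := by
    intro t ht
    obtain ⟨h1, h2, h3, h4⟩ := hcoords t ht
    refine ⟨h1, by omega, h3, ?_⟩
    have := hMrow t.1.toNat (by omega)
    omega
  rw [pvApply_mget _ _ hws k l,
    pv_find?_reverse _ _ (pv_allWs_unique D L filas hOK (k : Int) (l : Int)),
    pv_find_allWs D L filas hOK (k : Int) (l : Int) (Int.natCast_nonneg k) (Int.natCast_nonneg l)]
  by_cases hsel : (if filas then (k : Int) else (l : Int)) < L
  · rw [dif_pos hsel, if_pos hsel, Option.map_map]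
    have hsnd : ((fun t : Int × Int × Bool => t.2.2) ∘
        pvOrient filas (if filas then (k : Int) else (l : Int)))
        = fun pv : Int × Bool => pv.2 := by
      funext pv
      cases filas <;> rfl
    rw [hsnd]
    have hcg := pv_cell_lookup (PySem.List.pyGetD D (if filas then (k : Int) else (l : Int)) [])
      (pvEsp D L (if filas then (k : Int) else (l : Int)))
      (((PySem.List.pyGetD D (if filas then (k : Int) else (l : Int)) []).length : Int))
      (if filas then (l : Int) else (k : Int)) (pvMget M k l) 0 0
    rw [zero_add] at hcg
    rw [← hcg]
    rfl
  · rw [dif_neg hsel, if_neg hsel]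
    rfl

theorem pv_main_filas (D : List (List Int)) (L : Int) (M : List (List Bool))
    (hOK : pvRowsOK D L) (hML : L ≤ (M.length : Int))
    (hMrow : ∀ r : Nat, r < L.toNat → L ≤ ((M.getD r []).length : Int)) :
    pvApply (pvAllWs D L true) M =
      (PySem.List.enumerate M 0).map (fun ir =>
        if ir.1 < L then
          (PySem.List.enumerate ir.2 0).map (fun cv =>
            pvCell (PySem.List.pyGetD D ir.1 []) L cv.1 cv.2)
        else ir.2) := by
  have h0 : ∀ t ∈ pvAllWs D L true, 0 ≤ t.1 :=
    fun t ht => (pv_allWs_coords D L true hOK t ht).1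
  have hlen : (pvApply (pvAllWs D L true) M).length = M.length := pvApply_length _ _ h0
  apply List.ext_getElem
  · rw [hlen, List.length_map, PySem.List.length_enumerate]
  · intro k hk1 hk2
    have hkM : k < M.length := by omega
    rw [List.getElem_map, PySem.List.getElem_enumerate M 0 k (by
      rw [PySem.List.length_enumerate]; exact hkM)]
    simp only [zero_add]
    have hrowLHS : (pvApply (pvAllWs D L true) M)[k] = (pvApply (pvAllWs D L true) M).getD k [] :=
      (List.getD_eq_getElem _ _ hk1).symm
    have hrowlen : ((pvApply (pvAllWs D L true) M).getD k []).length = (M.getD k []).length :=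
      pvApply_row_length _ _ h0 k
    have hMk : M.getD k [] = M[k] := List.getD_eq_getElem _ _ hkM
    by_cases hkL : (k : Int) < L
    · rw [if_pos hkL]
      apply List.ext_getElem
      · rw [List.length_map, PySem.List.length_enumerate, hrowLHS, hrowlen, hMk]
      · intro l hl1 hl2
        have hlMk : l < M[k].length := by
          rw [List.length_map, PySem.List.length_enumerate] at hl2; exact hl2
        rw [List.getElem_map, PySem.List.getElem_enumerate M[k] 0 l (by
          rw [PySem.List.length_enumerate]; exact hlMk)]
        simp only [zero_add]
        have hcell : (pvApply (pvAllWs D L true) M)[k][l] = pvMget (pvApply (pvAllWs D L true) M) k l := by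
          unfold pvMget
          rw [List.getD_eq_getElem _ _ hk1, List.getD_eq_getElem _ _ hl1]
        rw [hcell, pv_apply_cell D L M true hOK hML hMrow k l]
        simp only [reduceIte]
        rw [if_pos hkL]
        unfold pvMget
        rw [hMk, List.getD_eq_getElem _ _ hlMk]
    · rw [if_neg hkL]
      apply List.ext_getElem
      · rw [hrowLHS, hrowlen, hMk]
      · intro l hl1 hl2
        have hcell : (pvApply (pvAllWs D L true) M)[k][l] = pvMget (pvApply (pvAllWs D L true) M) k l := by
          unfold pvMget
          rw [List.getD_eq_getElem _ _ hk1, List.getD_eq_getElem _ _ hl1]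
        rw [hcell, pv_apply_cell D L M true hOK hML hMrow k l]
        simp only [reduceIte]
        rw [if_neg hkL]
        unfold pvMget
        rw [hMk, List.getD_eq_getElem _ _ hl2]

theorem pv_main_columnas (D : List (List Int)) (L : Int) (M : List (List Bool))
    (hOK : pvRowsOK D L) (hML : L ≤ (M.length : Int))
    (hMrow : ∀ r : Nat, r < L.toNat → L ≤ ((M.getD r []).length : Int)) :
    pvApply (pvAllWs D L false) M =
      (PySem.List.enumerate M 0).map (fun ir =>
        (PySem.List.enumerate ir.2 0).map (fun cv =>
          if cv.1 < L then pvCell (PySem.List.pyGetD D cv.1 []) L ir.1 cv.2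
          else cv.2)) := by
  have h0 : ∀ t ∈ pvAllWs D L false, 0 ≤ t.1 :=
    fun t ht => (pv_allWs_coords D L false hOK t ht).1
  have hlen : (pvApply (pvAllWs D L false) M).length = M.length := pvApply_length _ _ h0
  apply List.ext_getElem
  · rw [hlen, List.length_map, PySem.List.length_enumerate]
  · intro k hk1 hk2
    have hkM : k < M.length := by omega
    rw [List.getElem_map, PySem.List.getElem_enumerate M 0 k (by
      rw [PySem.List.length_enumerate]; exact hkM)]
    simp only [zero_add]
    have hrowLHS : (pvApply (pvAllWs D L false) M)[k] = (pvApply (pvAllWs D L false) M).getD k [] :=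
      (List.getD_eq_getElem _ _ hk1).symm
    have hrowlen : ((pvApply (pvAllWs D L false) M).getD k []).length = (M.getD k []).length :=
      pvApply_row_length _ _ h0 k
    have hMk : M.getD k [] = M[k] := List.getD_eq_getElem _ _ hkM
    apply List.ext_getElem
    · rw [List.length_map, PySem.List.length_enumerate, hrowLHS, hrowlen, hMk]
    · intro l hl1 hl2
      have hlMk : l < M[k].length := by
        rw [List.length_map, PySem.List.length_enumerate] at hl2; exact hl2
      rw [List.getElem_map, PySem.List.getElem_enumerate M[k] 0 l (by
        rw [PySem.List.length_enumerate]; exact hlMk)]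
      simp only [zero_add]
      have hcell : (pvApply (pvAllWs D L false) M)[k][l] = pvMget (pvApply (pvAllWs D L false) M) k l := by
        unfold pvMget
        rw [List.getD_eq_getElem _ _ hk1, List.getD_eq_getElem _ _ hl1]
      rw [hcell, pv_apply_cell D L M false hOK hML hMrow k l]
      simp only [Bool.false_eq_true, reduceIte]
      have hold : pvMget M k l = M[k][l] := by
        unfold pvMget
        rw [hMk, List.getD_eq_getElem _ _ hlMk]
      by_cases hlL : (l : Int) < L
      · rw [if_pos hlL, if_pos hlL, hold]
      · rw [if_neg hlL, if_neg hlL, hold]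

-- ===== VERDICT (by name: the statement is the Claim_ definition above) =====
theorem Comienzo_spec : Claim_equal_Comienzo := by
  intro Matriz Determinador Longitud Tipo _hDom hPre
  unfold Spec_Comienzo Comienzo Comienzo_alt
  obtain ⟨-, hTip⟩ := hPre
  by_cases hF : Tipo = "Filas"
  · subst hF
    simp only [reduceIte, String.reduceEq]
    obtain ⟨hML, hMrow, hrows⟩ := hTip (Or.inl rfl)
    have hOK : pvRowsOK Determinador Longitud := by
      intro i h0 hiL
      rw [PySem.List.pyGetD_of_nonneg _ _ h0]
      exact hrows i.toNat (by omega)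
    exact (pv_generic (fun i m c v => pvWrite m i c v) Determinador Longitud Matriz hrows).trans
      ((pv_oldB_apply (fun i m c v => pvWrite m i c v) true (fun i m p v => rfl)
          Determinador Longitud Matriz).trans
        (pv_main_filas Determinador Longitud Matriz hOK hML hMrow))
  · by_cases hC : Tipo = "Columnas"
    · subst hC
      simp only [reduceIte, String.reduceEq]
      obtain ⟨hML, hMrow, hrows⟩ := hTip (Or.inr rfl)
      have hOK : pvRowsOK Determinador Longitud := by
        intro i h0 hiL
        rw [PySem.List.pyGetD_of_nonneg _ _ h0]
        exact hrows i.toNat (by omega)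
      exact (pv_generic (fun i m c v => pvWrite m c i v) Determinador Longitud Matriz hrows).trans
        ((pv_oldB_apply (fun i m c v => pvWrite m c i v) false (fun i m p v => rfl)
            Determinador Longitud Matriz).trans
          (pv_main_columnas Determinador Longitud Matriz hOK hML hMrow))
    · rw [if_neg hF, if_neg hC]
      apply pv_foldl_id
      intro Macc i _
      dsimp only
      show (List.foldl _ (_, _) _).1 = Macc
      rw [pv_foldl_fst_const _ (fun s j => ?_) _ _]
      show (List.foldl _ (_, _) _).1 = s.1
      rw [pv_foldl_fst_const _ (fun p k => ?_) _ _]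
      split_ifs <;> simp
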